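-- pv_equiv track=rewrite | github.com/pbean/godot-spacetime | scripts/compatibility/validate-foundation.py | version_satisfies_baseline
-- ===== SOURCE A (Python) =====
-- def version_satisfies_baseline(extracted: str, baseline: str) -> bool:
--     minimum_parts = baseline.rstrip("+").split(".")
--     extracted_parts = extracted.split(".")
--
--     for index, minimum_part in enumerate(minimum_parts):
--         try:
--             minimum_value = int(minimum_part)
--         except ValueError:
--             minimum_value = 0
--
--         if index < len(extracted_parts):
--             try:
--                 extracted_value = int(extracted_parts[index])
--             except ValueError:
--                 extracted_value = 0
--         else:
--             extracted_value = 0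
--
--         if extracted_value > minimum_value:
--             return True
--         if extracted_value < minimum_value:
--             return False
--
--     return True
-- ===== SOURCE B (Python) =====
-- def version_satisfies_baseline(extracted: str, baseline: str) -> bool:
--     def parse(part):
--         try:
--             return int(part)
--         except ValueError:
--             return 0
--
--     mins = [parse(p) for p in baseline.rstrip("+").split(".")]
--     parts = extracted.split(".")
--     exts = [parse(parts[i]) if i < len(parts) else 0 for i in range(len(mins))]
--     # Scan the components from LEAST significant to MOST significant, keeping a
--     # running verdict: a tie keeps the verdict of the less-significant suffix,
--     # any differing component overwrites it, so the most significant differing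
--     # component decides.  Correct because lexicographic >= is decided by the
--     # first differing position, i.e. the last one seen in this traversal.
--     verdict = True
--     for e, m in reversed(list(zip(exts, mins))):
--         if e != m:
--             verdict = e > m
--     return verdict
-- ===== Notes on version B (the rewrite author's own statement) =====
-- stated objective: alternative
-- what changed: B traverses the version components in the opposite order: it folds over the zipped (extracted, baseline) pairs from least significant to most significant with a running verdict that any differing pair overwrites, instead of A's most-significant-first loop with early returns; correct because the most significant differing component is the last one seen.
import Mathlib
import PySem

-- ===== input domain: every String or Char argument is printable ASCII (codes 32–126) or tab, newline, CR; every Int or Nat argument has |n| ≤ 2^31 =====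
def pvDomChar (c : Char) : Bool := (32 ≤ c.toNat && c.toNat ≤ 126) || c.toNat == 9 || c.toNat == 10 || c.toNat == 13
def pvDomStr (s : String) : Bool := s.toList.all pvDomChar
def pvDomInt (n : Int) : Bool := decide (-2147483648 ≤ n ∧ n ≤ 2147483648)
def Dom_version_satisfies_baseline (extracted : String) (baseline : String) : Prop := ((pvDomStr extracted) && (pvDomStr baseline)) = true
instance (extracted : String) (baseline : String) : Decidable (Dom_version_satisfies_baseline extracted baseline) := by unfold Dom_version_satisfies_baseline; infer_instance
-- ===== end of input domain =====

-- B replaces A's most-significant-first loop with early return by a reverse (least-significant-first)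
-- fold with a running verdict that the most significant differing component overwrites (objective: alternative).

-- shared Python builtins used by both sources:
-- int(s) with the ValueError -> 0 fallback (both Pythons use exactly this try/except)
def pvParseInt0 (s : String) : Int := (PySem.Int.ofStr? s).getD 0
-- s.rstrip("+"): drop trailing '+' characters; exact (hand port, PySem has no chars-argument rstrip)
def pvRstripPlus (s : String) : String := String.ofList ((s.toList.reverse.dropWhile (· == '+')).reverse)
-- s.split("."): separator is non-empty so split? is always some
def pvSplitDot (s : String) : List String := (PySem.Str.split? s ".").getD []

-- ===== PORT A =====
def pvGoA (eparts : List String) : List String → Nat → Bool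
  | [], _ => true
  | m :: ms, index =>
      let minimumValue := pvParseInt0 m
      let extractedValue := if index < eparts.length then pvParseInt0 (eparts.getD index "") else 0
      if extractedValue > minimumValue then true
      else if extractedValue < minimumValue then false
      else pvGoA eparts ms (index + 1)

def version_satisfies_baseline (extracted : String) (baseline : String) : Bool :=
  let minimum_parts := pvSplitDot (pvRstripPlus baseline)
  let extracted_parts := pvSplitDot extracted
  pvGoA extracted_parts minimum_parts 0

-- ===== PORT B =====
-- the loop body: a differing pair overwrites the verdict, a tie keeps it
def pvStep (verdict : Bool) (p : Int × Int) : Bool :=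
  if p.1 ≠ p.2 then decide (p.1 > p.2) else verdict

def version_satisfies_baseline_alt (extracted : String) (baseline : String) : Bool :=
  let mins := (pvSplitDot (pvRstripPlus baseline)).map pvParseInt0
  let parts := pvSplitDot extracted
  let exts := (List.range mins.length).map
    (fun i => if i < parts.length then pvParseInt0 (parts.getD i "") else 0)
  ((exts.zip mins).reverse).foldl pvStep true

-- ===== PRECONDITION & SPEC =====
def Spec_version_satisfies_baseline (extracted : String) (baseline : String) (out : Bool) : Prop := out = version_satisfies_baseline_alt extracted baseline
instance (extracted : String) (baseline : String) (out : Bool) : Decidable (Spec_version_satisfies_baseline extracted baseline out) := by unfold Spec_version_satisfies_baseline; infer_instance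

-- ===== CLAIM (what is proved, stated in full; the proofs are below) =====
def Claim_equal_version_satisfies_baseline : Prop := ∀ (extracted : String) (baseline : String), Dom_version_satisfies_baseline extracted baseline → Spec_version_satisfies_baseline extracted baseline (version_satisfies_baseline extracted baseline)

-- ===== LEMMAS AND PROOFS =====
-- front-first recursive comparison, the shape of A's loop on the zipped pairs
def pvFront : List (Int × Int) → Bool
  | [] => true
  | p :: t =>
      if p.1 > p.2 then true
      else if p.1 < p.2 then false
      else pvFront t

lemma pvFoldRev_eq_pvFront (L : List (Int × Int)) :
    L.reverse.foldl pvStep true = pvFront L := by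
  induction L with
  | nil => simp [pvFront]
  | cons p t ih =>
      rw [List.reverse_cons, List.foldl_append]
      simp only [List.foldl_cons, List.foldl_nil, pvFront, pvStep, ih]
      rcases lt_trichotomy p.1 p.2 with h | h | h
      · simp [ne_of_lt h, not_lt_of_gt h, h]
      · simp [h]
      · simp [ne_of_gt h, h]

lemma pvGoA_eq_pvFront (ps : List String) (ms : List String) (i : Nat) :
    pvGoA ps ms i =
      pvFront (((List.range ms.length).map
          (fun j => if i + j < ps.length then pvParseInt0 (ps.getD (i + j) "") else 0)).zip
        (ms.map pvParseInt0)) := by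
  induction ms generalizing i with
  | nil => simp [pvGoA, pvFront]
  | cons m t ih =>
      have hfun :
          ((fun j => if i + j < ps.length then pvParseInt0 (ps.getD (i + j) "") else 0) ∘ Nat.succ)
            = (fun j => if (i + 1) + j < ps.length then pvParseInt0 (ps.getD ((i + 1) + j) "") else 0) := by
        funext j
        simp only [Function.comp]
        have : i + Nat.succ j = (i + 1) + j := by omega
        rw [this]
      simp only [List.length_cons, List.range_succ_eq_map, List.map_cons, List.map_map, hfun,
        Nat.add_zero, List.zip_cons_cons, pvFront]
      rw [← ih (i + 1)]
      simp only [pvGoA]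

-- ===== VERDICT (by name: the statement is the Claim_ definition above) =====
theorem version_satisfies_baseline_spec : Claim_equal_version_satisfies_baseline := by
  intro extracted baseline _
  unfold Spec_version_satisfies_baseline version_satisfies_baseline version_satisfies_baseline_alt
  rw [pvFoldRev_eq_pvFront]
  simp only [List.length_map]
  rw [pvGoA_eq_pvFront (pvSplitDot extracted) (pvSplitDot (pvRstripPlus baseline)) 0]
  simp
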